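-- pv_equiv track=rewrite | github.com/Vorce-Studios/Vorce | scripts/dev-tools/query-code-atlas.py | build_symbol_preview
-- ===== SOURCE A (Python) =====
-- def build_symbol_preview(entry: dict, filters: dict[str, list[str]]) -> str:
--     symbols = entry.get("symbol_names", [])
--     if not symbols:
--         return "-"
--
--     query_symbols = [value.lower() for value in filters.get("symbol", [])]
--     prioritized: list[str] = []
--     if query_symbols:
--         prioritized.extend(
--             symbol
--             for symbol in symbols
--             if any(query == symbol.lower() or query in symbol.lower() for query in query_symbols)
--         )
--
--     for symbol in symbols:
--         if symbol not in prioritized: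
--             prioritized.append(symbol)
--
--     preview = prioritized[:8]
--     return ", ".join(preview)
-- ===== SOURCE B (Python) =====
-- def build_symbol_preview(entry: dict, filters: dict[str, list[str]]) -> str:
--     symbols = entry.get("symbol_names", [])
--     if not symbols:
--         return "-"
--
--     queries = [value.lower() for value in filters.get("symbol", [])]
--     matched: list[str] = []
--     rest: list[str] = []
--     seen: set[str] = set()
--     for symbol in symbols:
--         low = symbol.lower()
--         if any(query in low for query in queries):
--             matched.append(symbol)
--         elif symbol not in seen:
--             seen.add(symbol)
--             rest.append(symbol)
--
--     return ", ".join((matched + rest)[:8])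
-- ===== Notes on version B (the rewrite author's own statement) =====
-- stated objective: alternative
-- what changed: B makes one pass over the symbols instead of A's two (a filter over all symbols followed by a dedup loop that rescans the growing prioritized list per symbol), classifying each symbol once into matched/rest with a seen-set replacing A's list-membership rescan.
import Mathlib
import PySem

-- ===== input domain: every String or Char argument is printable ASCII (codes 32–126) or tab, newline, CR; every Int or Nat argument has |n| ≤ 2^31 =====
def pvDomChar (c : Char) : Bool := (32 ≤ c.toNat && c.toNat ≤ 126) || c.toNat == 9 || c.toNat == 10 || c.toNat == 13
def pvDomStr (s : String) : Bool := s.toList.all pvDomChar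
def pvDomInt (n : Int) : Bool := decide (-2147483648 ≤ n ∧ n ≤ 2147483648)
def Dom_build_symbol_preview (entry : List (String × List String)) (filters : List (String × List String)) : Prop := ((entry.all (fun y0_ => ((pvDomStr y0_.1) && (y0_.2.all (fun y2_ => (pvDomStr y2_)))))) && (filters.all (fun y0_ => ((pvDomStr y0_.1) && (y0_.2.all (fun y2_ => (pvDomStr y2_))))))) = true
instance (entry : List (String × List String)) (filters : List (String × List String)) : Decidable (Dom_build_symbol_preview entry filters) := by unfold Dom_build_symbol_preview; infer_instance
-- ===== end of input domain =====

-- B does one pass over the symbols instead of A's two (a match-filter pass plus a dedup pass that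
-- rescans the growing prioritized list), tracking seen non-matching symbols in a set: alternative decomposition.

-- ===== PORT A =====
def build_symbol_preview (entry : List (String × List String)) (filters : List (String × List String)) : String :=
  let symbols := (PySem.Dict.mk entry).getD "symbol_names" []
  if symbols = [] then "-"
  else
    let query_symbols := ((PySem.Dict.mk filters).getD "symbol" []).map PySem.Str.lower
    let prioritized : List String :=
      if query_symbols ≠ [] then
        symbols.filter (fun symbol =>
          query_symbols.any (fun query =>
            query == PySem.Str.lower symbol || PySem.Str.isIn query (PySem.Str.lower symbol)))
      else []
    let prioritized := symbols.foldl
      (fun acc symbol => if acc.contains symbol then acc else acc ++ [symbol]) prioritized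
    PySem.Str.join ", " (prioritized.take 8)

-- ===== PORT B =====
def build_symbol_preview_alt (entry : List (String × List String)) (filters : List (String × List String)) : String :=
  let symbols := (PySem.Dict.mk entry).getD "symbol_names" []
  if symbols = [] then "-"
  else
    let queries := ((PySem.Dict.mk filters).getD "symbol" []).map PySem.Str.lower
    let st := symbols.foldl
      (fun (st : List String × List String × PySem.Set String) symbol =>
        let low := PySem.Str.lower symbol
        if queries.any (fun query => PySem.Str.isIn query low) then
          (st.1 ++ [symbol], st.2.1, st.2.2)
        else if PySem.Set.contains st.2.2 symbol then st
        else (st.1, st.2.1 ++ [symbol], PySem.Set.add st.2.2 symbol))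
      ([], [], PySem.Set.empty)
    PySem.Str.join ", " ((st.1 ++ st.2.1).take 8)

-- ===== PRECONDITION & SPEC =====
def Spec_build_symbol_preview (entry : List (String × List String)) (filters : List (String × List String)) (out : String) : Prop := out = build_symbol_preview_alt entry filters
instance (entry : List (String × List String)) (filters : List (String × List String)) (out : String) : Decidable (Spec_build_symbol_preview entry filters out) := by unfold Spec_build_symbol_preview; infer_instance

-- ===== CLAIM (what is proved, stated in full; the proofs are below) =====
def Claim_equal_build_symbol_preview : Prop := ∀ (entry : List (String × List String)) (filters : List (String × List String)), Dom_build_symbol_preview entry filters → Spec_build_symbol_preview entry filters (build_symbol_preview entry filters)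

-- ===== LEMMAS AND PROOFS =====

-- the shared "seen non-matching symbols" accumulator
def pvSeenLoop (p : String → Bool) (ys : List String) (r : List String) : List String :=
  ys.foldl (fun r s => if p s then r else PySem.Set.add r s) r

-- matching is the plain substring test: `query == low` implies `query in low`
theorem pv_isIn_self (s : String) : PySem.Str.isIn s s = true := by
  rw [PySem.Str.isIn_iff_infix]

theorem pv_pred_eq (q L : String) :
    (q == L || PySem.Str.isIn q L) = PySem.Str.isIn q L := by
  cases hq : q == L with
  | false => simp
  | true =>
    have hqL : q = L := eq_of_beq hq
    subst hqL
    rw [pv_isIn_self]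
    simp

theorem pv_set_add_of_contains {r : List String} {s : String}
    (hc : PySem.Set.contains r s = true) : PySem.Set.add r s = r := by
  simp only [PySem.Set.add]
  rw [if_pos hc]

theorem pv_set_add_of_not_contains {r : List String} {s : String}
    (hc : ¬ PySem.Set.contains r s = true) : PySem.Set.add r s = r ++ [s] := by
  simp only [PySem.Set.add]
  rw [if_neg hc]

-- B's fold computes (matched ++ filter, seenLoop, seenLoop) when rest = seen
theorem pv_foldB (p : String → Bool) (ys : List String) (m r : List String) :
    ys.foldl
      (fun (st : List String × List String × PySem.Set String) s =>
        if p s then (st.1 ++ [s], st.2.1, st.2.2)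
        else if PySem.Set.contains st.2.2 s then st
        else (st.1, st.2.1 ++ [s], PySem.Set.add st.2.2 s))
      (m, r, r)
    = (m ++ ys.filter p, pvSeenLoop p ys r, pvSeenLoop p ys r) := by
  induction ys generalizing m r with
  | nil => simp [pvSeenLoop]
  | cons s ys ih =>
    simp only [List.foldl_cons]
    by_cases hp : p s = true
    · rw [if_pos hp, ih]
      simp [pvSeenLoop, hp]
    · rw [if_neg hp]
      by_cases hc : PySem.Set.contains r s = true
      · rw [if_pos hc, ih]
        simp [pvSeenLoop, hp, pv_set_add_of_contains hc]
      · rw [if_neg hc, pv_set_add_of_not_contains hc, ih]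
        simp [pvSeenLoop, hp, pv_set_add_of_not_contains hc]

-- A's dedup loop, started from M ++ r where M holds exactly the matching symbols,
-- keeps M intact and appends exactly the unseen non-matching symbols
theorem pv_foldA (p : String → Bool) (ys : List String) (M : List String)
    (hM : ∀ x ∈ M, p x = true) (r : List String)
    (hys : ∀ x ∈ ys, p x = true → x ∈ M)
    (hr : ∀ x ∈ r, p x = false) :
    ys.foldl (fun acc s => if acc.contains s then acc else acc ++ [s]) (M ++ r)
    = M ++ pvSeenLoop p ys r := by
  induction ys generalizing r with
  | nil => simp [pvSeenLoop]
  | cons s ys ih =>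
    simp only [List.foldl_cons, pvSeenLoop, List.foldl_cons]
    have hys' : ∀ x ∈ ys, p x = true → x ∈ M :=
      fun x hx => hys x (List.mem_cons_of_mem _ hx)
    by_cases hp : p s = true
    · have hmem : s ∈ M ++ r := List.mem_append_left _ (hys s (List.mem_cons_self) hp)
      rw [if_pos (List.contains_iff_mem.mpr hmem), if_pos hp]
      exact ih r hys' hr
    · have hsM : s ∉ M := fun h => hp (hM s h)
      have hmem : (M ++ r).contains s = r.contains s := by
        by_cases hsr : s ∈ r
        · rw [List.contains_iff_mem.mpr (List.mem_append_right _ hsr),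
            List.contains_iff_mem.mpr hsr]
        · have : s ∉ M ++ r := by
            rw [List.mem_append]; rintro (h | h); exacts [hsM h, hsr h]
          rw [Bool.eq_false_iff.mpr (fun h => this (List.contains_iff_mem.mp h)),
            Bool.eq_false_iff.mpr (fun h => hsr (List.contains_iff_mem.mp h))]
      rw [if_neg hp, hmem]
      by_cases hc : r.contains s = true
      · rw [if_pos hc, pv_set_add_of_contains hc]
        exact ih r hys' hr
      · rw [if_neg hc, pv_set_add_of_not_contains hc, List.append_assoc]
        refine ih (r ++ [s]) hys' ?_
        intro x hx
        rcases List.mem_append.mp hx with h | h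
        · exact hr x h
        · rw [List.mem_singleton.mp h]
          exact Bool.eq_false_iff.mpr hp

-- ===== VERDICT (by name: the statement is the Claim_ definition above) =====
theorem build_symbol_preview_spec : Claim_equal_build_symbol_preview := by
  intro entry filters _
  unfold Spec_build_symbol_preview build_symbol_preview build_symbol_preview_alt
  dsimp only
  set symbols := (PySem.Dict.mk entry).getD "symbol_names" [] with hsym
  by_cases hs : symbols = []
  · rw [if_pos hs, if_pos hs]
  · rw [if_neg hs, if_neg hs]
    set qs := ((PySem.Dict.mk filters).getD "symbol" []).map PySem.Str.lower with hqs
    have hfilter :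
        (if qs ≠ [] then
          symbols.filter (fun symbol =>
            qs.any (fun query =>
              query == PySem.Str.lower symbol || PySem.Str.isIn query (PySem.Str.lower symbol)))
        else []) = symbols.filter (fun s => qs.any (fun q => PySem.Str.isIn q (PySem.Str.lower s))) := by
      by_cases hq : qs = []
      · simp [hq]
      · rw [if_pos hq]
        apply List.filter_congr
        intro x _
        congr 1
        funext q
        exact pv_pred_eq q (PySem.Str.lower x)
    rw [hfilter]
    have hA := pv_foldA (fun s => qs.any (fun q => PySem.Str.isIn q (PySem.Str.lower s))) symbols
      (symbols.filter (fun s => qs.any (fun q => PySem.Str.isIn q (PySem.Str.lower s))))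
      (fun x hx => (List.mem_filter.mp hx).2) []
      (fun x hx hpx => List.mem_filter.mpr ⟨hx, hpx⟩)
      (by simp)
    rw [List.append_nil] at hA
    rw [hA]
    simp only [show (PySem.Set.empty : PySem.Set String) = [] from rfl]
    rw [pv_foldB (fun s => qs.any (fun q => PySem.Str.isIn q (PySem.Str.lower s))) symbols [] []]
    simp
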